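/- GENERATED by mk_final_copies.py from the proof of the farm's unit `start_decoder.C14a` (farm:start_decoder.C14a.1: Proof.lean) as the
   re-elaboration sweep compiled it — do not edit. -/
import Vorbis.Spec.Units.start_decoder_C14a
import Vorbis.Spec.Worked.start_decoder_C14a_Lemmas

/-- Segment C14a of `start_decoder`: `call setup_malloc` for the `multiplicands` block, both arms (`Lemmas.lean`: `c14a_walk`). -/
theorem Vorbis.Spec.Worked.start_decoder_C14a_ok : Vorbis.Spec.start_decoder_C14a.Statement := by
  intro Lay hLay μ hμ u₀ hcode hmalloc
  exact Vorbis.Spec.start_decoder_C14a.c14a_walk Lay hLay μ hμ u₀ hcode hmalloc
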